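-- pv_equiv track=rewrite | github.com/TheFruitGuy/BioDCASE | task/download_aadc.py | _factor_stages
-- ===== SOURCE A (Python) =====
-- def _factor_stages(ratio: int, max_q: int = 13) -> list[int]:
--     """Factor `ratio` into a sequence of stages, each <= max_q.
--
--     Greedy from the largest divisor downward. Used as fallback when an input
--     file has an unexpected sample rate.
--     """
--     if ratio <= 1:
--         return []
--     if ratio <= max_q:
--         return [ratio]
--     for q in range(max_q, 1, -1):
--         if ratio % q == 0:
--             return [q] + _factor_stages(ratio // q, max_q)
--     raise ValueError(f"Cannot factor decimation ratio {ratio} into stages <= {max_q}")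
-- ===== SOURCE B (Python) =====
-- def _factor_stages(ratio: int, max_q: int = 13) -> list[int]:
--     """Iterative version: each step finds the LARGEST divisor <= max_q by an
--     ascending scan keeping the maximum, instead of a descending first-match
--     recursion."""
--     stages = []
--     while ratio > max(max_q, 1):
--         best = 0
--         for d in range(2, max_q + 1):
--             if ratio % d == 0:
--                 best = d
--         if best == 0:
--             raise ValueError(f"Cannot factor decimation ratio {ratio} into stages <= {max_q}")
--         stages.append(best)
--         ratio //= best
--     if ratio > 1:
--         stages.append(ratio)
--     return stages
-- ===== Notes on version B (the rewrite author's own statement) =====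
-- stated objective: alternative
-- what changed: Replaces A's recursion with descending first-match divisor search by an iterative while-loop whose inner step scans ascending from 2 keeping the maximum divisor (a fold), accumulating stages in a list.
import Mathlib
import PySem

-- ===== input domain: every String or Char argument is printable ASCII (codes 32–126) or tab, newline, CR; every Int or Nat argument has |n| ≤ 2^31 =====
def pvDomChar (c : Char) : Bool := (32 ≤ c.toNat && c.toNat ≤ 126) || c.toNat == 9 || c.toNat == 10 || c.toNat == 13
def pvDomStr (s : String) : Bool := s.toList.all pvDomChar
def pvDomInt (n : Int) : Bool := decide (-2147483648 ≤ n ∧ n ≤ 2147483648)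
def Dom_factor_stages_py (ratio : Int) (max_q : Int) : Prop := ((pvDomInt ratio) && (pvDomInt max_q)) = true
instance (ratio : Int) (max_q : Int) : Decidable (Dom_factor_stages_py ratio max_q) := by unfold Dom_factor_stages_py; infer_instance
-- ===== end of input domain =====

-- B replaces A's recursion (descending first-match divisor scan) by an iterative while-loop whose
-- inner step scans ascending keeping the maximum divisor; equivalence is about the return value.
-- Both ports use a fuel parameter (ratio.toNat + 1, always sufficient) purely as a totality guard.

-- ===== PORT A =====
-- 'for q in range(max_q, 1, -1): if ratio % q == 0: return …' — first divisor found in the countdown, none = fall through to raise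
def fsFindA (ratio : Int) : List Int → Option Int
  | [] => none
  | q :: rest => if PySem.Int.mod ratio q = 0 then some q else fsFindA ratio rest

-- the recursion of A; one fuel unit per recursive call (ratio strictly shrinks, so fuel never runs out)
def fsGoA (fuel : Nat) (ratio : Int) (max_q : Int) : List Int :=
  match fuel with
  | 0 => []
  | fuel + 1 =>
    if ratio ≤ 1 then []
    else if ratio ≤ max_q then [ratio]
    else
      match fsFindA ratio (PySem.List.pyRange max_q 1 (-1)) with
      | some q => q :: fsGoA fuel (PySem.Int.floordiv ratio q) max_q
      | none => []   -- Python raises ValueError here; excluded by Pre_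

def factor_stages_py (ratio : Int) (max_q : Int) : List Int :=
  fsGoA (ratio.toNat + 1) ratio max_q

-- ===== PORT B =====
-- the inner ascending scan of Source B: fold keeping the last (= largest) divisor seen, 0 if none
def fsBest (ratio : Int) (l : List Int) : Int :=
  l.foldl (fun b d => if PySem.Int.mod ratio d = 0 then d else b) 0

-- the while-loop of Source B, with the trailing 'if ratio > 1: stages.append(ratio)'; fuel as above
def fsLoop (fuel : Nat) (ratio : Int) (max_q : Int) (stages : List Int) : List Int :=
  match fuel with
  | 0 => stages
  | fuel + 1 =>
    if ratio > max max_q 1 then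
      if fsBest ratio (PySem.List.pyRange 2 (max_q + 1) 1) = 0 then
        stages   -- Python raises ValueError here; excluded by Pre_
      else
        fsLoop fuel (PySem.Int.floordiv ratio (fsBest ratio (PySem.List.pyRange 2 (max_q + 1) 1))) max_q
          (stages ++ [fsBest ratio (PySem.List.pyRange 2 (max_q + 1) 1)])
    else if ratio > 1 then stages ++ [ratio] else stages

def factor_stages_py_alt (ratio : Int) (max_q : Int) : List Int :=
  fsLoop (ratio.toNat + 1) ratio max_q []

-- ===== PRECONDITION & SPEC =====
-- Pre_ excludes exactly the inputs where A raises ValueError: ratio > max(1, max_q) with either max_q < 2 or a prime factor of ratio above max_q.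
def Pre_factor_stages_py (ratio : Int) (max_q : Int) : Prop :=
  ratio ≤ 1 ∨ ratio ≤ max_q ∨
    (2 ≤ max_q ∧ ∀ p ∈ (ratio.toNat).primeFactorsList, (p : Int) ≤ max_q)
instance (ratio : Int) (max_q : Int) : Decidable (Pre_factor_stages_py ratio max_q) := by unfold Pre_factor_stages_py; infer_instance
def pvWitness_factor_stages_py : Int × Int := (6, 13)

def Spec_factor_stages_py (ratio : Int) (max_q : Int) (out : List Int) : Prop := out = factor_stages_py_alt ratio max_q
instance (ratio : Int) (max_q : Int) (out : List Int) : Decidable (Spec_factor_stages_py ratio max_q out) := by unfold Spec_factor_stages_py; infer_instance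

-- ===== CLAIM (what is proved, stated in full; the proofs are below) =====
def Claim_equal_factor_stages_py : Prop := ∀ (ratio : Int) (max_q : Int), Dom_factor_stages_py ratio max_q → Pre_factor_stages_py ratio max_q → Spec_factor_stages_py ratio max_q (factor_stages_py ratio max_q)

-- ===== LEMMAS AND PROOFS =====

-- a divisor found by the countdown scan lies in the scanned range
theorem fsFindA_mem (ratio : Int) (l : List Int) (q : Int) (h : fsFindA ratio l = some q) : q ∈ l := by
  induction l with
  | nil => simp [fsFindA] at h
  | cons x rest ih =>
    by_cases hx : PySem.Int.mod ratio x = 0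
    · simp [fsFindA, hx] at h; simp [h]
    · simp [fsFindA, hx] at h; exact List.mem_cons_of_mem _ (ih h)

-- first match in a concatenation
theorem fsFindA_append (ratio : Int) (u v : List Int) :
    fsFindA ratio (u ++ v) = (fsFindA ratio u).orElse (fun _ => fsFindA ratio v) := by
  induction u with
  | nil => rfl
  | cons x rest ih =>
    by_cases hx : PySem.Int.mod ratio x = 0
    · simp [fsFindA, hx]
    · simp [fsFindA, hx, ih]

-- the fold keeping the LAST divisor seen equals the FIRST divisor of the reversed list
theorem fsBest_eq_find_reverse (ratio : Int) (l : List Int) :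
    ∀ acc : Int, l.foldl (fun b d => if PySem.Int.mod ratio d = 0 then d else b) acc
      = ((fsFindA ratio l.reverse).getD acc) := by
  induction l with
  | nil => intro acc; rfl
  | cons x rest ih =>
    intro acc
    simp only [List.foldl_cons, List.reverse_cons]
    rw [ih, fsFindA_append]
    cases hfr : fsFindA ratio rest.reverse with
    | some q => simp [Option.orElse]
    | none =>
      by_cases hx : PySem.Int.mod ratio x = 0 <;> simp [Option.orElse, fsFindA, hx]

-- hence: fsBest over the ascending range is the descending first match (0 if none)
theorem fsBest_eq_findA (ratio max_q : Int) :
    fsBest ratio (PySem.List.pyRange 2 (max_q + 1) 1)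
      = (fsFindA ratio (PySem.List.pyRange max_q 1 (-1))).getD 0 := by
  unfold fsBest
  rw [fsBest_eq_find_reverse, PySem.List.pyRange_neg_one_eq_reverse]
  norm_num

-- any divisor found by the countdown scan is at least 2, so 'best = 0' iff no divisor
theorem fsFindA_countdown_pos (ratio max_q q : Int)
    (h : fsFindA ratio (PySem.List.pyRange max_q 1 (-1)) = some q) : 1 < q ∧ q ≤ max_q := by
  have := fsFindA_mem ratio _ q h
  rw [PySem.List.mem_pyRange_neg_one] at this
  exact this

-- core: with the SAME fuel, B's loop computes acc ++ (A's recursion) — both consume one fuel unit per division step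
theorem fsLoop_eq (fuel : Nat) : ∀ (ratio max_q : Int) (acc : List Int),
    fsLoop fuel ratio max_q acc = acc ++ fsGoA fuel ratio max_q := by
  induction fuel with
  | zero => intro ratio max_q acc; simp [fsLoop, fsGoA]
  | succ fuel ih =>
    intro ratio max_q acc
    rw [fsLoop, fsGoA]
    by_cases h1 : ratio ≤ 1
    · rw [if_neg (by omega), if_neg (by omega), if_pos h1]
      simp
    · by_cases h2 : ratio ≤ max_q
      · rw [if_neg (by omega), if_pos (by omega), if_neg h1, if_pos h2]
      · rw [if_pos (by omega), if_neg h1, if_neg h2]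
        rw [fsBest_eq_findA]
        cases hq : fsFindA ratio (PySem.List.pyRange max_q 1 (-1)) with
        | none => simp
        | some q =>
          have hq2 := fsFindA_countdown_pos ratio max_q q hq
          simp only [Option.getD_some]
          rw [if_neg (by omega), ih]
          simp

-- ===== VERDICT (by name: the statement is the Claim_ definition above) =====
theorem factor_stages_py_spec : Claim_equal_factor_stages_py := by
  intro ratio max_q _ _
  unfold Spec_factor_stages_py factor_stages_py_alt factor_stages_py
  rw [fsLoop_eq]
  simp
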